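-- pv_equiv track=rewrite | github.com/ackness/ai-gamestudio | backend/app/api/runtime_settings.py | _group_schema_by_plugin
-- ===== SOURCE A (Python) =====
-- from typing import Any, Literal
--
-- def _group_schema_by_plugin(schema_fields: list[dict[str, Any]]) -> dict[str, list[str]]:
--     grouped: dict[str, list[str]] = {}
--     for field in schema_fields:
--         plugin_name = str(field.get("plugin_name") or "")
--         key = str(field.get("key") or "")
--         if not plugin_name or not key:
--             continue
--         grouped.setdefault(plugin_name, []).append(key)
--     return grouped
-- ===== SOURCE B (Python) =====
-- def _group_schema_by_plugin(schema_fields):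
--     pairs = [
--         (p, k)
--         for p, k in (
--             (str(f.get("plugin_name") or ""), str(f.get("key") or ""))
--             for f in schema_fields
--         )
--         if p and k
--     ]
--     grouped = {}
--     while pairs:
--         plugin = pairs[0][0]
--         grouped[plugin] = [k for q, k in pairs if q == plugin]
--         pairs = [(q, k) for q, k in pairs if q != plugin]
--     return grouped
-- ===== Notes on version B (the rewrite author's own statement) =====
-- stated objective: alternative
-- what changed: B first extracts the filtered (plugin, key) pairs with a comprehension, then groups by repeated partitioning: peel off the first remaining plugin, collect its keys in one scan, and loop on the pairs of the other plugins, instead of A's single dict-setdefault accumulation loop.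
import Mathlib
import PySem

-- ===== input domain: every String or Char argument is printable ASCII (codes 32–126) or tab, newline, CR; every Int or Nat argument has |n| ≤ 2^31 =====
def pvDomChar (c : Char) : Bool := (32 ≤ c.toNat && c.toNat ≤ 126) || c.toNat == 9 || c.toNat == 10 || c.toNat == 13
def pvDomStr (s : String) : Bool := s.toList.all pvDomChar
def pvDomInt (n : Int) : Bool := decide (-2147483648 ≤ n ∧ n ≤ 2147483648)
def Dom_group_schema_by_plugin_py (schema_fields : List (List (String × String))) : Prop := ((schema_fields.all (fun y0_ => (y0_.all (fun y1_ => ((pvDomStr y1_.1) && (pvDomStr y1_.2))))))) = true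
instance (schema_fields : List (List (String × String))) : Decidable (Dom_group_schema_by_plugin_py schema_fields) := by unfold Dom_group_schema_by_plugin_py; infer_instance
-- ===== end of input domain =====

-- B extracts the filtered (plugin, key) pairs once and then groups them by repeated
-- partitioning (peel off the first remaining plugin, collect its keys, recurse on the rest),
-- instead of A's dict-setdefault accumulation loop (objective: alternative).

-- ===== PORT A =====
def group_schema_by_plugin_py (schema_fields : List (List (String × String))) : List (String × List String) :=
  (schema_fields.foldl (fun (grouped : PySem.Dict String (List String)) field =>
      let plugin_name := ((PySem.Dict.mk field).get? "plugin_name").getD ""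
      let key := ((PySem.Dict.mk field).get? "key").getD ""
      if plugin_name = "" ∨ key = "" then grouped
      else grouped.modify plugin_name [] (· ++ [key]))   -- setdefault(p, []).append(k)
    PySem.Dict.empty).items

-- ===== PORT B =====
-- the while-loop of Source B: peel off the first plugin, keep its keys, drop its pairs, loop
def pvGroupPairs : List (String × String) → List (String × List String)
  | [] => []
  | (p, k) :: rest =>
      (p, (((p, k) :: rest).filter (fun qk => qk.1 == p)).map Prod.snd)
        :: pvGroupPairs (((p, k) :: rest).filter (fun qk => qk.1 != p))
termination_by l => l.length
decreasing_by
  simp only [List.filter_cons, bne_self_eq_false, Bool.false_eq_true, if_false, List.length_cons]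
  exact Nat.lt_succ_of_le (List.length_filter_le _ _)

def group_schema_by_plugin_py_alt (schema_fields : List (List (String × String))) : List (String × List String) :=
  pvGroupPairs (schema_fields.filterMap (fun field =>
      let p := ((PySem.Dict.mk field).get? "plugin_name").getD ""
      let k := ((PySem.Dict.mk field).get? "key").getD ""
      if p = "" ∨ k = "" then none else some (p, k)))

-- ===== PRECONDITION & SPEC =====
def Spec_group_schema_by_plugin_py (schema_fields : List (List (String × String))) (out : List (String × List String)) : Prop := out = group_schema_by_plugin_py_alt schema_fields
instance (schema_fields : List (List (String × String))) (out : List (String × List String)) : Decidable (Spec_group_schema_by_plugin_py schema_fields out) := by unfold Spec_group_schema_by_plugin_py; infer_instance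

-- ===== CLAIM =====
def Claim_equal_group_schema_by_plugin_py : Prop := ∀ (schema_fields : List (List (String × String))), Dom_group_schema_by_plugin_py schema_fields → Spec_group_schema_by_plugin_py schema_fields (group_schema_by_plugin_py schema_fields)

-- ===== LEMMAS AND PROOFS =====

-- the common filtering step, as an Option-valued extractor (proof-side helper)
def pvExtract (field : List (String × String)) : Option (String × String) :=
  let plugin_name := ((PySem.Dict.mk field).get? "plugin_name").getD ""
  let key := ((PySem.Dict.mk field).get? "key").getD ""
  if plugin_name = "" ∨ key = "" then none else some (plugin_name, key)

theorem pvA_fold (sf : List (List (String × String))) (d : PySem.Dict String (List String)) :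
    sf.foldl (fun grouped field =>
      let plugin_name := ((PySem.Dict.mk field).get? "plugin_name").getD ""
      let key := ((PySem.Dict.mk field).get? "key").getD ""
      if plugin_name = "" ∨ key = "" then grouped
      else grouped.modify plugin_name [] (· ++ [key])) d
    = (sf.filterMap pvExtract).foldl (fun d p => d.modify p.1 [] (· ++ [p.2])) d := by
  induction sf generalizing d with
  | nil => rfl
  | cons f t ih =>
    simp only [List.foldl_cons, List.filterMap_cons, pvExtract]
    split_ifs with h <;> simp [ih, pvExtract]

-- the canonical "first-seen plugins, keys by filter" form of the grouping
def pvG (ps : List (String × String)) : List (String × List String) :=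
  (PySem.List.dedup (ps.map Prod.fst)).map
    (fun plugin => (plugin, (ps.filter (fun qk => qk.1 == plugin)).map Prod.snd))

theorem pvGroup (ps : List (String × String)) :
    (ps.foldl (fun (d : PySem.Dict String (List String)) p => d.modify p.1 [] (· ++ [p.2]))
      PySem.Dict.empty).items = pvG ps := by
  set d := ps.foldl (fun (d : PySem.Dict String (List String)) p => d.modify p.1 [] (· ++ [p.2]))
      PySem.Dict.empty with hd
  have hnd : d.keys.Nodup := by
    rw [hd]
    exact PySem.Dict.nodup_keys_foldl_modify_key ps Prod.fst [] (fun _ p => (· ++ [p.2])) _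
      PySem.Dict.nodup_keys_empty
  have hkeys : d.keys = PySem.List.dedup (ps.map Prod.fst) := by
    rw [hd, PySem.Dict.keys_foldl_modify_key]
    simp [PySem.Dict.keys_empty, PySem.Set.update_nil_left]
  rw [PySem.Dict.items_eq_map_keys d hnd [], hkeys, pvG]
  refine List.map_congr_left (fun k _ => ?_)
  have := PySem.Dict.getD_foldl_modify_append (d := PySem.Dict.empty) (l := ps) (c := k)
  rw [hd]
  simp only [this, PySem.Dict.getD_empty, List.nil_append]

-- first-occurrence dedup peels the head and filters it out of the tail
theorem pvFoldl_add_cons {α : Type} [DecidableEq α] (l : List α) (x : α) (s : List α) :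
    l.foldl PySem.Set.add (x :: s) = x :: (l.filter (fun y => y ≠ x)).foldl PySem.Set.add s := by
  induction l generalizing s with
  | nil => simp
  | cons y t ih =>
    by_cases hxy : y = x
    · subst hxy
      simp only [List.foldl_cons, List.filter_cons]
      have h1 : PySem.Set.add (y :: s) y = y :: s := by
        simp [PySem.Set.add, PySem.Set.contains]
      simp [ih]
    · simp only [List.foldl_cons, List.filter_cons, hxy, decide_true,
        ne_eq, not_false_eq_true, if_true]
      have h1 : PySem.Set.add (x :: s) y = x :: PySem.Set.add s y := by
        simp only [PySem.Set.add, PySem.Set.contains]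
        by_cases hmem : y ∈ s <;> simp [hmem, hxy]
      rw [h1, ih]

theorem pvDedup_cons {α : Type} [DecidableEq α] (x : α) (l : List α) :
    PySem.List.dedup (x :: l) = x :: PySem.List.dedup (l.filter (fun y => y ≠ x)) := by
  simp only [PySem.List.dedup_eq_ofList, PySem.Set.ofList_eq_foldl, List.foldl_cons]
  have h0 : PySem.Set.add ([] : List α) x = [x] := by simp [PySem.Set.add, PySem.Set.contains]
  rw [h0, pvFoldl_add_cons]

theorem pvMapFst_filter_ne (p : String) (l : List (String × String)) :
    (l.filter (fun qk => qk.1 != p)).map Prod.fst = (l.map Prod.fst).filter (fun y => y ≠ p) := by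
  induction l with
  | nil => rfl
  | cons a t iht =>
    simp only [bne] at iht ⊢
    by_cases h : a.1 = p <;> simp [h, iht]

theorem pvGroupPairs_eq_pvG (ps : List (String × String)) : pvGroupPairs ps = pvG ps := by
  induction ps using pvGroupPairs.induct with
  | case1 => simp [pvGroupPairs, pvG]
  | case2 p k rest ih =>
    have hhead : ((p, k) :: rest).filter (fun qk => qk.1 != p)
        = rest.filter (fun qk => qk.1 != p) := by
      simp
    rw [pvGroupPairs, ih, hhead]
    unfold pvG
    rw [pvMapFst_filter_ne, List.map_cons, pvDedup_cons, List.map_cons]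
    congr 1
    refine List.map_congr_left (fun q hq => ?_)
    have hqne : q ≠ p := by
      have := (List.mem_filter.mp ((PySem.List.mem_dedup _ _).mp hq)).2
      simpa using this
    congr 1
    have hcons : ((p, k) :: rest).filter (fun qk => qk.1 == q) = rest.filter (fun qk => qk.1 == q) := by
      simp [Ne.symm hqne]
    rw [hcons, List.filter_filter]
    congr 1
    apply List.filter_congr
    intro a _
    cases h : (a.1 == q)
    · simp
    · have : a.1 = q := by simpa using h
      simp [this, bne, hqne]

-- ===== VERDICT =====
theorem group_schema_by_plugin_py_spec : Claim_equal_group_schema_by_plugin_py := by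
  intro sf _
  unfold Spec_group_schema_by_plugin_py group_schema_by_plugin_py group_schema_by_plugin_py_alt
  have hext : (fun field : List (String × String) =>
      let p := ((PySem.Dict.mk field).get? "plugin_name").getD ""
      let k := ((PySem.Dict.mk field).get? "key").getD ""
      if p = "" ∨ k = "" then none else some (p, k)) = pvExtract := rfl
  rw [pvA_fold, pvGroup, hext, pvGroupPairs_eq_pvG]
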